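-- pv_equiv track=rewrite | github.com/Aryudesu/myLibrary | math/p_adic/p_adic.py | p_adic_fraction
-- ===== SOURCE A (Python) =====
-- def p_adic_fraction(m: int, n: int, p: int, l: int) -> list[int]:
--     """
--     m/n を p進数で l桁（p進展開の下位からl桁）まで求める
--     """
--     result = []
--     x = 0
--     mod = 1
--     for _ in range(l):
--         mod *= p
--         # n * x ≡ m (mod mod) を解く
--         for a in range(p):
--             cand = x + a * (mod // p)
--             if (n * cand - m) % mod == 0:
--                 x = cand
--                 result.append(a)
--                 break
--     return result
-- ===== SOURCE B (Python) =====
-- def _gcd(a, b):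
--     # Euclid on nonnegative ints
--     while b:
--         a, b = b, a % b
--     return a
--
--
-- def _egcd(a, b):
--     # returns (g, x) with g = gcd(a, b) and a*x == g (mod b), for a, b >= 0
--     x0, x1, r0, r1 = 1, 0, a, b
--     while r1:
--         q = r0 // r1
--         r0, r1 = r1, r0 - q * r1
--         x0, x1 = x1, x0 - q * x1
--     return r0, x0
--
--
-- def p_adic_fraction(m: int, n: int, p: int, l: int) -> list[int]:
--     """
--     p-adic long division: each digit is computed directly with a modular
--     inverse instead of scanning all p residues.
--     """
--     if p <= 0:
--         return []
--     d = _gcd(abs(n), p)          # d >= 1 since p >= 1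
--     q = p // d
--     _, x = _egcd((n // d) % q, q)
--     ninv = x % q                 # inverse of n/d modulo q
--     digits = []
--     r = m
--     for _ in range(l):
--         if r % d:
--             break
--         a = (r // d) * ninv % q
--         digits.append(a)
--         r = (r - a * n) // p
--     return digits
-- ===== Notes on version B (the rewrite author's own statement) =====
-- stated objective: faster
-- what changed: Replaces A's per-digit brute-force scan over all p residues (testing each candidate against a modulus that grows to p^l) by p-adic long division: one gcd + extended-gcd computes a modular inverse once, then every digit comes directly from one multiplication mod p/d and the remainder is updated by an exact division.
import Mathlib
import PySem

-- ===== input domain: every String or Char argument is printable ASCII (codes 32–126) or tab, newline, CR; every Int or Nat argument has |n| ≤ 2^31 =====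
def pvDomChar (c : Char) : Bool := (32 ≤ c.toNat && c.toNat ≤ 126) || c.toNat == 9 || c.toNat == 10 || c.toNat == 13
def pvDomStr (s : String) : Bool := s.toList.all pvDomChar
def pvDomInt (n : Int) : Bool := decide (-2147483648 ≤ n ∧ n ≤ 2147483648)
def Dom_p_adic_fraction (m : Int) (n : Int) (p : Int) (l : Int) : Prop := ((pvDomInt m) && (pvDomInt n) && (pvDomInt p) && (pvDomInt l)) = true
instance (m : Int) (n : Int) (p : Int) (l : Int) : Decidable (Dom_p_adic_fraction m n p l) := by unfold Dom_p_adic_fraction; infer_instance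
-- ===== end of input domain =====

-- B replaces A's per-digit scan over all p residues by a direct digit formula using a
-- modular inverse (p-adic long division); objective: faster.

-- ===== PORT A =====
-- the inner 'for a in range(p): … break': scan a = 0,1,… lazily (as Python's range is),
-- stopping at the first a that passes the test; fuel p.toNat = the length of range(p)
def aFind (m n p x md : Int) : Int → Nat → Option Int
  | _, 0 => none
  | a, f + 1 =>
    if PySem.Int.mod (n * (x + a * PySem.Int.floordiv md p) - m) md == 0 then some a
    else aFind m n p x md (a + 1) f

-- one iteration of A's outer loop (mod *= p, then the inner scan)
def aStep (m n p : Int) (s : List Int × Int × Int) : List Int × Int × Int :=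
  match aFind m n p s.2.1 (s.2.2 * p) 0 p.toNat with
  | some a => (s.1 ++ [a], s.2.1 + a * PySem.Int.floordiv (s.2.2 * p) p, s.2.2 * p)
  | none => (s.1, s.2.1, s.2.2 * p)

-- 'for _ in range(l)': l.toNat iterations over the state (result, x, mod)
def aLoop (m n p : Int) : Nat → (List Int × Int × Int) → List Int × Int × Int
  | 0, s => s
  | k + 1, s => aLoop m n p k (aStep m n p s)

def p_adic_fraction (m : Int) (n : Int) (p : Int) (l : Int) : List Int :=
  (aLoop m n p l.toNat ([], 0, 1)).1

-- ===== PORT B =====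
-- transliteration of Source B's _gcd (Euclid by while-loop; fuel |b|+1 only for termination,
-- the loop exits on b = 0 exactly as the Python does)
def bgcdAux : Nat → Int → Int → Int
  | 0, a, _ => a
  | f + 1, a, b => if b = 0 then a else bgcdAux f b (PySem.Int.mod a b)

def bgcd (a b : Int) : Int := bgcdAux (b.natAbs + 1) a b

-- transliteration of Source B's _egcd loop; state (x0, x1, r0, r1), returns (r0, x0)
def begcdAux : Nat → Int → Int → Int → Int → Int × Int
  | 0, x0, _, r0, _ => (r0, x0)
  | f + 1, x0, x1, r0, r1 =>
    if r1 = 0 then (r0, x0)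
    else begcdAux f x1 (x0 - PySem.Int.floordiv r0 r1 * x1) r1 (r0 - PySem.Int.floordiv r0 r1 * r1)

def begcd (x0 x1 r0 r1 : Int) : Int × Int := begcdAux (r1.natAbs + 1) x0 x1 r0 r1

-- transliteration of Source B's digit loop ('for _ in range(l): if r % d: break …')
def bLoop (n p d q ninv : Int) : Nat → List Int → Int → List Int
  | 0, digits, _ => digits
  | k+1, digits, r =>
    if PySem.Int.mod r d ≠ 0 then digits
    else
      let a := PySem.Int.mod (PySem.Int.floordiv r d * ninv) q
      bLoop n p d q ninv k (digits ++ [a]) (PySem.Int.floordiv (r - a * n) p)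

def p_adic_fraction_alt (m : Int) (n : Int) (p : Int) (l : Int) : List Int :=
  if p ≤ 0 then []
  else
    let d := bgcd |n| p
    let q := PySem.Int.floordiv p d
    let ninv := PySem.Int.mod (begcd 1 0 (PySem.Int.mod (PySem.Int.floordiv n d) q) q).2 q
    bLoop n p d q ninv l.toNat [] m

-- ===== PRECONDITION & SPEC =====
def Spec_p_adic_fraction (m : Int) (n : Int) (p : Int) (l : Int) (out : List Int) : Prop := out = p_adic_fraction_alt m n p l
instance (m : Int) (n : Int) (p : Int) (l : Int) (out : List Int) : Decidable (Spec_p_adic_fraction m n p l out) := by unfold Spec_p_adic_fraction; infer_instance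

-- ===== CLAIM (what is proved, stated in full; the proofs are below) =====
def Claim_equal_p_adic_fraction : Prop := ∀ (m : Int) (n : Int) (p : Int) (l : Int), Dom_p_adic_fraction m n p l → Spec_p_adic_fraction m n p l (p_adic_fraction m n p l)


-- ===== LEMMAS AND PROOFS =====

-- A's outer loop is an iterate of aStep
theorem aLoop_eq_iterate (m n p : Int) :
    ∀ (k : Nat) (s : List Int × Int × Int), aLoop m n p k s = (aStep m n p)^[k] s := by
  intro k
  induction k with
  | zero => intro s; rfl
  | succ k ih =>
    intro s
    rw [Function.iterate_succ_apply]
    exact ih (aStep m n p s)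

-- A's lazy inner scan is the first match over range(p)
theorem aFind_eq (m n p x md : Int) : ∀ (f : Nat) (a : Int),
    aFind m n p x md a f = (PySem.List.pyRange a (a + (f : Int)) 1).find?
      (fun c => PySem.Int.mod (n * (x + c * PySem.Int.floordiv md p) - m) md == 0) := by
  intro f
  induction f with
  | zero =>
    intro a
    rw [show a + ((0 : Nat) : Int) = a by simp, PySem.List.pyRange_one_eq_nil le_rfl]
    rfl
  | succ f ih =>
    intro a
    rw [PySem.List.pyRange_one_cons (by push_cast; omega : a < a + ((f + 1 : Nat) : Int))]
    simp only [aFind]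
    by_cases hc : (PySem.Int.mod (n * (x + a * PySem.Int.floordiv md p) - m) md == 0) = true
    · rw [if_pos hc]
      exact (List.find?_cons_of_pos
        (p := fun c => PySem.Int.mod (n * (x + c * PySem.Int.floordiv md p) - m) md == 0) hc).symm
    · rw [if_neg hc, ih (a + 1)]
      rw [show (a + 1) + (f : Int) = a + ((f + 1 : Nat) : Int) by push_cast; ring]
      exact (List.find?_cons_of_neg
        (p := fun c => PySem.Int.mod (n * (x + c * PySem.Int.floordiv md p) - m) md == 0)
        (by simpa using hc)).symm

-- bgcd is Int.gcd on nonnegative inputs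
theorem bgcdAux_eq_gcd : ∀ (N : Nat) (b : Int), b.natAbs < N → 0 ≤ b → ∀ (a : Int), 0 ≤ a →
    bgcdAux N a b = (Int.gcd a b : Int) := by
  intro N
  induction N with
  | zero => intro b hbN; exact absurd hbN (Nat.not_lt_zero _)
  | succ N ih =>
    intro b hbN hb a ha
    simp only [bgcdAux]
    by_cases h : b = 0
    · subst h
      rw [if_pos rfl]
      simp [Int.natAbs_of_nonneg ha]
    · have hbpos : 0 < b := lt_of_le_of_ne hb (Ne.symm h)
      rw [if_neg h]
      have h1 := PySem.Int.mod_nonneg a hbpos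
      have h2 := PySem.Int.mod_lt a hbpos
      have hA := Int.natAbs_of_nonneg h1
      have hB := Int.natAbs_of_nonneg hb
      rw [ih (PySem.Int.mod a b) (by omega) h1 b hb]
      congr 1
      rw [PySem.Int.mod_eq_emod_of_pos hbpos, Int.gcd_comm b (a % b), Int.gcd_emod]

theorem bgcd_eq_gcd (b : Int) (hb : 0 ≤ b) (a : Int) (ha : 0 ≤ a) :
    bgcd a b = (Int.gcd a b : Int) :=
  bgcdAux_eq_gcd (b.natAbs + 1) b (by omega) hb a ha

-- find? over range(0,p) returns none when the predicate never holds
theorem find_range_none {p : Int} {f : Int → Bool}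
    (h : ∀ a, 0 ≤ a → a < p → f a = false) :
    (PySem.List.pyRange 0 p 1).find? f = none := by
  rw [List.find?_eq_none]
  intro x hx
  have hm := (PySem.List.mem_pyRange_one).1 hx
  simp [h x hm.1 hm.2]

-- find? over range(0,p) returns the least satisfying element
theorem find_range_some {p a0 : Int} {f : Int → Bool}
    (h0 : 0 ≤ a0) (hap : a0 < p) (ht : f a0 = true)
    (hmin : ∀ b, 0 ≤ b → b < a0 → f b = false) :
    (PySem.List.pyRange 0 p 1).find? f = some a0 := by
  rw [PySem.List.pyRange_one_append 0 a0 p h0 (le_of_lt hap), List.find?_append]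
  have h1 : (PySem.List.pyRange 0 a0 1).find? f = none := by
    rw [List.find?_eq_none]
    intro x hx
    have hm := (PySem.List.mem_pyRange_one).1 hx
    simp [hmin x hm.1 hm.2]
  rw [h1, PySem.List.pyRange_one_cons hap, List.find?_cons_of_pos ht]
  rfl

-- egcd invariant: the first component runs Euclid, the second keeps a0*x ≡ r (mod M)
theorem begcdAux_spec (M a0 : Int) : ∀ (N : Nat) (r1 : Int), r1.natAbs < N → 0 ≤ r1 →
    ∀ (x0 x1 r0 : Int), 0 ≤ r0 →
    Int.ModEq M (a0 * x0) r0 → Int.ModEq M (a0 * x1) r1 →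
    (begcdAux N x0 x1 r0 r1).1 = (Int.gcd r0 r1 : Int) ∧
      Int.ModEq M (a0 * (begcdAux N x0 x1 r0 r1).2) (begcdAux N x0 x1 r0 r1).1 := by
  intro N
  induction N with
  | zero => intro r1 hN; exact absurd hN (Nat.not_lt_zero _)
  | succ N ih =>
    intro r1 hN hr1 x0 x1 r0 hr0 e0 e1
    simp only [begcdAux]
    by_cases h : r1 = 0
    · subst h
      rw [if_pos rfl]
      exact ⟨by simp [Int.natAbs_of_nonneg hr0], e0⟩
    · have hpos : 0 < r1 := lt_of_le_of_ne hr1 (Ne.symm h)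
      rw [if_neg h]
      have hmodeq : r0 - PySem.Int.floordiv r0 r1 * r1 = PySem.Int.mod r0 r1 := by
        have hk := PySem.Int.floordiv_mul_add_mod r0 r1
        linarith
      have h1 : 0 ≤ r0 - PySem.Int.floordiv r0 r1 * r1 := by
        rw [hmodeq]; exact PySem.Int.mod_nonneg r0 hpos
      have h2 : r0 - PySem.Int.floordiv r0 r1 * r1 < r1 := by
        rw [hmodeq]; exact PySem.Int.mod_lt r0 hpos
      have hnat : (r0 - PySem.Int.floordiv r0 r1 * r1).natAbs < N := by
        have hlt := Int.natAbs_lt_natAbs_of_nonneg_of_lt h1 h2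
        omega
      have e1' : Int.ModEq M (a0 * (x0 - PySem.Int.floordiv r0 r1 * x1))
          (r0 - PySem.Int.floordiv r0 r1 * r1) := by
        have hc : a0 * (x0 - PySem.Int.floordiv r0 r1 * x1)
            = a0 * x0 - PySem.Int.floordiv r0 r1 * (a0 * x1) := by ring
        rw [hc]
        exact e0.sub (e1.mul_left (PySem.Int.floordiv r0 r1))
      have hrec := ih (r0 - PySem.Int.floordiv r0 r1 * r1) hnat h1 x1
        (x0 - PySem.Int.floordiv r0 r1 * x1) r1 (le_of_lt hpos) e1 e1'
      refine ⟨?_, hrec.2⟩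
      rw [hrec.1]
      congr 1
      rw [hmodeq, PySem.Int.mod_eq_emod_of_pos hpos, Int.gcd_comm r1 (r0 % r1), Int.gcd_emod]

theorem begcd_spec (M a0 r1 : Int) (hr1 : 0 ≤ r1) (x0 x1 r0 : Int) (hr0 : 0 ≤ r0)
    (e0 : Int.ModEq M (a0 * x0) r0) (e1 : Int.ModEq M (a0 * x1) r1) :
    (begcd x0 x1 r0 r1).1 = (Int.gcd r0 r1 : Int) ∧
      Int.ModEq M (a0 * (begcd x0 x1 r0 r1).2) (begcd x0 x1 r0 r1).1 :=
  begcdAux_spec M a0 (r1.natAbs + 1) r1 (by omega) hr1 x0 x1 r0 hr0 e0 e1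

-- the exact division mod // p after mod *= p
theorem mp_calc (p : Int) (hp : 0 < p) (md : Int) :
    PySem.Int.floordiv (md * p) p = md := by
  rw [PySem.Int.floordiv_eq_ediv_of_pos hp]
  exact Int.mul_ediv_cancel md (ne_of_gt hp)

-- A's inner test at a level with invariant n*x - m = -(p^j)*r is 'p divides a*n - r'
theorem pred_iff (m n p x r : Int) (j : Nat) (hp : 0 < p)
    (hinv : n * x - m = -(p ^ j) * r) (a : Int) :
    ((PySem.Int.mod (n * (x + a * p ^ j) - m) (p ^ j * p) == 0) = true) ↔ p ∣ (a * n - r) := by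
  rw [beq_iff_eq, PySem.Int.mod_eq_zero_iff_dvd]
  have hE : n * (x + a * p ^ j) - m = p ^ j * (a * n - r) := by
    have h1 : n * (x + a * p ^ j) - m = (n * x - m) + a * n * p ^ j := by ring
    rw [h1, hinv]; ring
  rw [hE]
  exact mul_dvd_mul_iff_left (pow_ne_zero j (ne_of_gt hp))

-- once A's inner scan has failed, every later iteration leaves the result unchanged
theorem dead_run (m n p d : Int) (hp : 0 < p) (hd0 : 0 < d) (hdp : d ∣ p) :
    ∀ (k : Nat) (res : List Int) (x md r : Int) (j : Nat),
      n * x - m = -(p ^ j) * r → ¬ d ∣ r → p ^ (j + 1) ∣ md →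
      ((aStep m n p)^[k] (res, x, md)).1 = res := by
  intro k
  induction k with
  | zero => intro res x md r j _ _ _; rfl
  | succ k ih =>
    intro res x md r j hinv hnd hdvd
    rw [Function.iterate_succ_apply]
    have hfind : aFind m n p (res, x, md).2.1 ((res, x, md).2.2 * p) 0 p.toNat = none := by
      show aFind m n p x (md * p) 0 p.toNat = none
      rw [aFind_eq, Int.toNat_of_nonneg (le_of_lt hp), zero_add]
      apply find_range_none
      intro a _ _
      simp only [mp_calc p hp]
      rw [beq_eq_false_iff_ne]
      rw [Ne, PySem.Int.mod_eq_zero_iff_dvd]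
      intro hdd
      -- md*p divides n*(x + a*md) - m = -(p^j)*r + a*n*md
      have hE : n * (x + a * md) - m = -(p ^ j) * r + a * n * md := by
        have h1 : n * (x + a * md) - m = (n * x - m) + a * n * md := by ring
        rw [h1, hinv]
      have hd1 : (p ^ (j + 1) : Int) ∣ n * (x + a * md) - m :=
        dvd_trans (dvd_trans hdvd (Dvd.intro p rfl)) hdd
      have hd2 : (p ^ (j + 1) : Int) ∣ a * n * md := Dvd.dvd.mul_left hdvd (a * n)
      have hd3 : (p ^ (j + 1) : Int) ∣ -(p ^ j) * r := by
        have := dvd_sub hd1 hd2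
        rwa [hE, add_sub_cancel_right] at this
      have hd4 : p ∣ r := by
        have h5 : (p ^ j * p : Int) ∣ p ^ j * (-r) := by
          rw [← pow_succ]
          simpa [neg_mul, mul_comm] using hd3
        have h6 := (mul_dvd_mul_iff_left (pow_ne_zero j (ne_of_gt hp))).1 h5
        exact (dvd_neg).1 h6
      exact hnd (dvd_trans hdp hd4)
    have hstep : aStep m n p (res, x, md) = (res, x, md * p) := by
      unfold aStep
      rw [hfind]
    rw [hstep]
    exact ih res x (md * p) r j hinv hnd (dvd_trans hdvd (Dvd.intro p rfl))

-- the main simulation: A's loop state tracks B's remainder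
theorem run_eq (m n p d q ninv : Int) (hp : 0 < p) (hd0 : 0 < d)
    (hdn : d ∣ n) (hpq : p = d * q) (hq0 : 0 < q)
    (hninv : Int.ModEq q (n / d * ninv) 1) :
    ∀ (k : Nat) (digits : List Int) (x r : Int) (j : Nat),
      n * x - m = -(p ^ j) * r →
      ((aStep m n p)^[k] (digits, x, p ^ j)).1 = bLoop n p d q ninv k digits r := by
  intro k
  induction k with
  | zero => intro digits x r j _; rfl
  | succ k ih =>
    intro digits x r j hinv
    rw [Function.iterate_succ_apply]
    have hdp : d ∣ p := Dvd.intro q (by rw [hpq, mul_comm])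
    by_cases hdr : d ∣ r
    · -- a digit exists; it is B's formula
      have hndd : d * (n / d) = n := Int.mul_ediv_cancel' hdn
      have hrdd : d * (r / d) = r := Int.mul_ediv_cancel' hdr
      set a0 : Int := PySem.Int.mod (r / d * ninv) q with ha0
      have ha00 : 0 ≤ a0 := PySem.Int.mod_nonneg _ hq0
      have ha0q : a0 < q := PySem.Int.mod_lt _ hq0
      have hqp : q ≤ p := by nlinarith
      have ha0e : Int.ModEq q a0 (r / d * ninv) := by
        rw [ha0, PySem.Int.mod_eq_emod_of_pos hq0]
        exact Int.emod_emod_of_dvd _ dvd_rfl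
      -- a0 satisfies the congruence a*n ≡ r (mod p)
      have hsat : p ∣ a0 * n - r := by
        have h1 : Int.ModEq q (a0 * (n / d)) (r / d) := by
          calc a0 * (n / d)
              ≡ r / d * ninv * (n / d) [ZMOD q] := ha0e.mul_right (n / d)
            _ = r / d * (n / d * ninv) := by ring
            _ ≡ r / d * 1 [ZMOD q] := hninv.mul_left (r / d)
            _ = r / d := by ring
        have h2 : q ∣ a0 * (n / d) - r / d := (Int.modEq_iff_dvd.1 h1.symm)
        have h3 : d * q ∣ d * (a0 * (n / d) - r / d) := mul_dvd_mul_left d h2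
        have h4 : d * (a0 * (n / d) - r / d) = a0 * n - r := by
          have : d * (a0 * (n / d) - r / d) = a0 * (d * (n / d)) - d * (r / d) := by ring
          rw [this, hndd, hrdd]
        rwa [← hpq, h4] at h3
      -- and it is the least such residue
      have hmin : ∀ b : Int, 0 ≤ b → b < a0 → ¬ p ∣ b * n - r := by
        intro b hb0 hba hdvd
        have h2 : q ∣ b * (n / d) - r / d := by
          have h3 : d * q ∣ d * (b * (n / d) - r / d) := by
            have h4 : d * (b * (n / d) - r / d) = b * n - r := by
              have : d * (b * (n / d) - r / d) = b * (d * (n / d)) - d * (r / d) := by ring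
              rw [this, hndd, hrdd]
            rw [h4, ← hpq]; exact hdvd
          exact (mul_dvd_mul_iff_left (ne_of_gt hd0)).1 h3
        have h5 : Int.ModEq q (b * (n / d)) (r / d) := (Int.modEq_iff_dvd.2 h2).symm
        have h6 : Int.ModEq q b a0 := by
          calc b = b * 1 := by ring
            _ ≡ b * (n / d * ninv) [ZMOD q] := hninv.symm.mul_left b
            _ = b * (n / d) * ninv := by ring
            _ ≡ r / d * ninv [ZMOD q] := h5.mul_right ninv
            _ ≡ a0 [ZMOD q] := ha0e.symm
        have h7 : q ∣ a0 - b := Int.modEq_iff_dvd.1 h6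
        have h8 : q ≤ a0 - b := Int.le_of_dvd (by omega) h7
        omega
      have hfind : aFind m n p (digits, x, p ^ j).2.1 ((digits, x, p ^ j).2.2 * p) 0 p.toNat = some a0 := by
        show aFind m n p x (p ^ j * p) 0 p.toNat = some a0
        rw [aFind_eq, Int.toNat_of_nonneg (le_of_lt hp), zero_add]
        apply find_range_some ha00 (lt_of_lt_of_le ha0q hqp)
        · simp only [mp_calc p hp]
          exact (pred_iff m n p x r j hp hinv a0).2 hsat
        · intro b hb0 hba
          simp only [mp_calc p hp]
          rw [beq_eq_false_iff_ne, Ne]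
          rw [PySem.Int.mod_eq_zero_iff_dvd]
          intro hdd
          exact hmin b hb0 hba ((pred_iff m n p x r j hp hinv b).1
            (by rw [beq_iff_eq, PySem.Int.mod_eq_zero_iff_dvd]; exact hdd))
      have hstep : aStep m n p (digits, x, p ^ j)
          = (digits ++ [a0], x + a0 * p ^ j, p ^ j * p) := by
        unfold aStep
        rw [hfind]
        simp only [mp_calc p hp]
      -- B takes its else-branch with the same digit
      have hbr : PySem.Int.mod r d = 0 := (PySem.Int.mod_eq_zero_iff_dvd r d).2 hdr
      have hfl : PySem.Int.floordiv r d = r / d := PySem.Int.floordiv_eq_ediv_of_pos hd0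
      -- the new remainder
      have hpd : p ∣ r - a0 * n := by
        have := (dvd_neg (α := Int)).2 hsat
        simpa [neg_sub] using this
      obtain ⟨t, ht⟩ : ∃ t, PySem.Int.floordiv (r - a0 * n) p = t := ⟨_, rfl⟩
      have hr' : r - a0 * n = p * t := by
        rw [← ht, PySem.Int.floordiv_eq_ediv_of_pos hp]
        exact (Int.mul_ediv_cancel' hpd).symm
      have hinv' : n * (x + a0 * p ^ j) - m = -(p ^ (j + 1)) * t := by
        have h1 : n * (x + a0 * p ^ j) - m = (n * x - m) + a0 * n * p ^ j := by ring
        rw [h1, hinv, pow_succ]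
        have h2 : -(p ^ j) * r + a0 * n * p ^ j = p ^ j * (-(r - a0 * n)) := by ring
        rw [h2, hr']
        ring
      rw [hstep, bLoop]
      simp only [hbr, hfl, ne_eq, not_true_eq_false, if_false]
      rw [← ha0, ht]
      have hgoal := ih (digits ++ [a0]) (x + a0 * p ^ j) t (j + 1) hinv'
      rw [pow_succ] at hgoal
      exact hgoal
    · -- no digit exists: A freezes, B breaks
      have hfind : aFind m n p (digits, x, p ^ j).2.1 ((digits, x, p ^ j).2.2 * p) 0 p.toNat = none := by
        show aFind m n p x (p ^ j * p) 0 p.toNat = none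
        rw [aFind_eq, Int.toNat_of_nonneg (le_of_lt hp), zero_add]
        apply find_range_none
        intro a ha0 hap
        simp only [mp_calc p hp]
        rw [beq_eq_false_iff_ne, Ne, PySem.Int.mod_eq_zero_iff_dvd]
        intro hdd
        have h1 : p ∣ a * n - r := (pred_iff m n p x r j hp hinv a).1
          (by rw [beq_iff_eq, PySem.Int.mod_eq_zero_iff_dvd]; exact hdd)
        have h2 : d ∣ a * n - r := dvd_trans hdp h1
        have h3 : d ∣ a * n := Dvd.dvd.mul_left hdn a
        have h4 : d ∣ r := by
          have := dvd_sub h3 h2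
          simpa using this
        exact hdr h4
      have hstep : aStep m n p (digits, x, p ^ j) = (digits, x, p ^ j * p) := by
        unfold aStep
        rw [hfind]
      rw [hstep]
      have hbr : PySem.Int.mod r d ≠ 0 := fun hc => hdr ((PySem.Int.mod_eq_zero_iff_dvd r d).1 hc)
      rw [bLoop, if_pos hbr]
      exact dead_run m n p d hp hd0 hdp k digits x (p ^ j * p) r j hinv hdr
        (by rw [pow_succ])

-- for p ≤ 0 A's inner range is empty and the result list never grows
theorem neg_run (m n p : Int) (hp : p ≤ 0) :
    ∀ (k : Nat) (s : List Int × Int × Int), ((aStep m n p)^[k] s).1 = s.1 := by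
  intro k
  induction k with
  | zero => intro s; rfl
  | succ k ih =>
    intro s
    rw [Function.iterate_succ_apply, ih (aStep m n p s)]
    unfold aStep
    rw [show p.toNat = 0 from Int.toNat_of_nonpos hp]
    rfl

-- ===== VERDICT (by name: the statement is the Claim_ definition above) =====
theorem p_adic_fraction_spec : Claim_equal_p_adic_fraction := by
  intro m n p l _
  unfold Spec_p_adic_fraction p_adic_fraction p_adic_fraction_alt
  rw [aLoop_eq_iterate]
  by_cases hp : p ≤ 0
  · rw [if_pos hp]
    exact neg_run m n p hp _ _
  · rw [if_neg hp]
    push_neg at hp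
    have hd : bgcd |n| p = (Int.gcd n p : Int) := by
      rw [bgcd_eq_gcd p (le_of_lt hp) |n| (abs_nonneg n)]
      unfold Int.gcd
      rw [Int.natAbs_abs]
    have hgpos : 0 < Int.gcd n p := Int.gcd_pos_iff.2 (Or.inr (ne_of_gt hp))
    have hd0 : 0 < bgcd |n| p := by rw [hd]; exact_mod_cast hgpos
    have hdn : bgcd |n| p ∣ n := by rw [hd]; exact Int.gcd_dvd_left n p
    have hdp : bgcd |n| p ∣ p := by rw [hd]; exact Int.gcd_dvd_right n p
    have hq : PySem.Int.floordiv p (bgcd |n| p) = p / bgcd |n| p :=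
      PySem.Int.floordiv_eq_ediv_of_pos hd0
    have hpq : p = bgcd |n| p * (p / bgcd |n| p) := (Int.mul_ediv_cancel' hdp).symm
    have hq0 : 0 < p / bgcd |n| p := by
      by_contra hcon
      have h1 : p / bgcd |n| p ≤ 0 := not_lt.1 hcon
      nlinarith
    -- the modular inverse computed by egcd
    have hfn : PySem.Int.floordiv n (bgcd |n| p) = n / bgcd |n| p :=
      PySem.Int.floordiv_eq_ediv_of_pos hd0
    set q : Int := p / bgcd |n| p with hqdef
    set a' : Int := PySem.Int.mod (PySem.Int.floordiv n (bgcd |n| p)) q with ha'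
    have ha'0 : 0 ≤ a' := PySem.Int.mod_nonneg _ hq0
    have hspec := begcd_spec q a' q (le_of_lt hq0) 1 0 a' ha'0
      (by simpa using Int.ModEq.refl a') (by simp [Int.ModEq, Int.emod_self])
    have hgcd1 : Int.gcd a' q = 1 := by
      rw [ha', hfn, PySem.Int.mod_eq_emod_of_pos hq0, Int.gcd_emod, hqdef, hd]
      exact Int.gcd_div_gcd_div_gcd hgpos
    have hg1 : (begcd 1 0 a' q).1 = 1 := by
      rw [hspec.1, hgcd1]; rfl
    have hninv : Int.ModEq q (n / bgcd |n| p * PySem.Int.mod (begcd 1 0 a' q).2 q) 1 := by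
      have e1 : Int.ModEq q (n / bgcd |n| p) a' := by
        rw [ha', hfn, PySem.Int.mod_eq_emod_of_pos hq0]
        exact (Int.emod_emod_of_dvd _ dvd_rfl).symm
      have e2 : Int.ModEq q (PySem.Int.mod (begcd 1 0 a' q).2 q) (begcd 1 0 a' q).2 := by
        rw [PySem.Int.mod_eq_emod_of_pos hq0]
        exact Int.emod_emod_of_dvd _ dvd_rfl
      calc n / bgcd |n| p * PySem.Int.mod (begcd 1 0 a' q).2 q
          ≡ a' * (begcd 1 0 a' q).2 [ZMOD q] := e1.mul e2
        _ ≡ (begcd 1 0 a' q).1 [ZMOD q] := hspec.2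
        _ = 1 := hg1
    have hstart : n * 0 - m = -(p ^ 0) * m := by ring
    have := run_eq m n p (bgcd |n| p) q (PySem.Int.mod (begcd 1 0 a' q).2 q)
      hp hd0 hdn hpq hq0 hninv l.toNat [] 0 m 0 hstart
    rw [pow_zero] at this
    simpa [hq] using this
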